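-- pv_equiv track=rewrite | github.com/TheCDC/Project-Euler | euler_026.py | get_period
-- ===== SOURCE A (Python) =====
-- def get_period(n):
--     """Calculate period of digits of decimal expansion of 1/n"""
--     remainder = 1
--     i = 1
--     cache = {}
--     while True:
--         remainder = (10*remainder) % n
--         if remainder in cache:
--             return i - cache[remainder]
--
--         cache.update({remainder: i})
--         i += 1
-- ===== SOURCE B (Python) =====
-- def get_period(n):
--     """Calculate period of digits of decimal expansion of 1/n"""
--     # Jump straight into the repeating cycle with one modular exponentiation
--     # (after abs(n)+1 steps the remainder is certainly past the pre-periodic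
--     # tail), then count how many steps it takes the remainder to recur.
--     r = pow(10, abs(n) + 1, n)
--     s = (10 * r) % n
--     period = 1
--     while s != r:
--         s = (10 * s) % n
--         period += 1
--     return period
-- ===== Notes on version B (the rewrite author's own statement) =====
-- stated objective: alternative
-- what changed: Replaces the remainder->index hash map (first-repeat gap) by one modular exponentiation that jumps past the pre-periodic tail, followed by an O(1)-space loop counting how many steps the remainder takes to recur (the cycle length).
-- outside the precondition, e.g. on get_period(0): A raises ZeroDivisionError, B raises ValueError
import Mathlib
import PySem

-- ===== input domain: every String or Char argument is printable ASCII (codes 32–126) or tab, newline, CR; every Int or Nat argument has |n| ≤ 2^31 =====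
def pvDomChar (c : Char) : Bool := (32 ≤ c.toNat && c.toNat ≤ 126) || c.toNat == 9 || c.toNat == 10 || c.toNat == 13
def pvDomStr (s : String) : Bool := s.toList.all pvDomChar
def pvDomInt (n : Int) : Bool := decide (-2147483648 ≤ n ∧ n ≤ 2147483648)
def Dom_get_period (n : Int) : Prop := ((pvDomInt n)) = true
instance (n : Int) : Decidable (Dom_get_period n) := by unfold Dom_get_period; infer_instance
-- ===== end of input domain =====

-- B replaces A's remainder→index hash map by a modular-exponentiation jump past the
-- pre-periodic tail followed by an O(1)-space loop counting the cycle length.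

-- ===== PORT A =====
-- the 'while True' loop, fuel-bounded (n.natAbs + 2 iterations always suffice for n ≠ 0)
def get_period_go (n : Int) (remainder i : Int) (cache : PySem.Dict Int Int) : Nat → Int
  | 0 => 0
  | fuel+1 =>
    let r := PySem.Int.mod (10 * remainder) n
    if cache.contains r then i - cache.getD r 0
    else get_period_go n r (i + 1) (cache.insert r i) fuel

def get_period (n : Int) : Int :=
  get_period_go n 1 1 PySem.Dict.empty (n.natAbs + 2)

-- ===== PORT B =====
-- the 'while s != r' loop, fuel-bounded (n.natAbs + 2 iterations always suffice for n ≠ 0)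
def get_period_alt_go (n : Int) (r s period : Int) : Nat → Int
  | 0 => period
  | fuel+1 =>
    if s ≠ r then get_period_alt_go n r (PySem.Int.mod (10 * s) n) (period + 1) fuel
    else period

def get_period_alt (n : Int) : Int :=
  let r := PySem.Int.powMod 10 (n.natAbs + 1) n
  let s := PySem.Int.mod (10 * r) n
  get_period_alt_go n r s 1 (n.natAbs + 2)

-- ===== PRECONDITION & SPEC =====
-- Pre_ excludes exactly n = 0, where A raises ZeroDivisionError (and B raises ValueError).
def Pre_get_period (n : Int) : Prop := n ≠ 0
instance (n : Int) : Decidable (Pre_get_period n) := by unfold Pre_get_period; infer_instance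

def pvWitness_get_period : Int := 7

def Spec_get_period (n : Int) (out : Int) : Prop := out = get_period_alt n
instance (n : Int) (out : Int) : Decidable (Spec_get_period n out) := by unfold Spec_get_period; infer_instance

-- ===== CLAIM (what is proved, stated in full; the proofs are below) =====
def Claim_equal_get_period : Prop := ∀ (n : Int), Dom_get_period n → Pre_get_period n → Spec_get_period n (get_period n)

-- ===== LEMMAS AND PROOFS =====

-- the remainder sequence both loops walk: pySeq n i = 10^i % n (Python %), pySeq n 0 = 1
def pySeq (n : Int) : Nat → Int
  | 0 => 1
  | i+1 => PySem.Int.mod (10 * pySeq n i) n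

-- the cache A has built after m iterations: {pySeq 1 ↦ 1, …, pySeq m ↦ m}
def cacheOf (n : Int) : Nat → PySem.Dict Int Int
  | 0 => PySem.Dict.empty
  | m+1 => (cacheOf n m).insert (pySeq n (m+1)) ((m+1 : Nat) : Int)

-- the first-repeat predicate A's loop stops on
def RepP (n : Int) (i : Nat) : Prop := ∃ j < i, 1 ≤ j ∧ pySeq n i = pySeq n j

-- Python % absorbs an inner % on the left factor (positive modulus)
lemma pymod_mul_left_pos (a b n : Int) (hn : 0 < n) :
    PySem.Int.mod (a * PySem.Int.mod b n) n = PySem.Int.mod (a * b) n := by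
  simp only [PySem.Int.mod_eq_emod_of_pos hn]
  rw [Int.mul_emod, Int.emod_emod_of_dvd _ dvd_rfl, ← Int.mul_emod]

-- Python % absorbs an inner % on the left factor (any nonzero modulus)
lemma pymod_mul_left (a b n : Int) (hn : n ≠ 0) :
    PySem.Int.mod (a * PySem.Int.mod b n) n = PySem.Int.mod (a * b) n := by
  rcases lt_or_gt_of_ne hn with hneg | hpos
  · have e : ∀ x : Int, PySem.Int.mod x n = - PySem.Int.mod (-x) (-n) := by
      intro x
      have := PySem.Int.mod_neg_neg (-x) (-n)
      rw [neg_neg, neg_neg] at this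
      exact this
    rw [e (a * PySem.Int.mod b n), e b, e (a * b)]
    have h1 : a * -PySem.Int.mod (-b) (-n) = -(a * PySem.Int.mod (-b) (-n)) := by ring
    rw [h1, neg_neg]
    have h2 : PySem.Int.mod (a * PySem.Int.mod (-b) (-n)) (-n)
        = PySem.Int.mod (a * -b) (-n) := pymod_mul_left_pos a (-b) (-n) (by omega)
    rw [h2]
    have : a * -b = -(a * b) := by ring
    rw [this]
  · exact pymod_mul_left_pos a b n hpos

lemma pySeq_eq_powMod (n : Int) (hn : n ≠ 0) (m : Nat) (hm : 1 ≤ m) :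
    pySeq n m = PySem.Int.mod (10 ^ m) n := by
  induction m, hm using Nat.le_induction with
  | base => simp [pySeq]
  | succ m hm ih =>
    rw [show m + 1 = m + 1 from rfl]
    show PySem.Int.mod (10 * pySeq n m) n = _
    rw [ih, pymod_mul_left _ _ _ hn, pow_succ]
    congr 1
    ring

-- shifting: equal values propagate forward
lemma pySeq_shift (n : Int) (a b k : Nat) (h : pySeq n a = pySeq n b) :
    pySeq n (a + k) = pySeq n (b + k) := by
  induction k with
  | zero => simpa using h
  | succ k ih =>
    show PySem.Int.mod (10 * pySeq n (a + k)) n = PySem.Int.mod (10 * pySeq n (b + k)) n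
    rw [ih]

-- pigeonhole: a repeat occurs within the first natAbs n + 1 indices
lemma pySeq_repeat (n : Int) (hn : n ≠ 0) :
    ∃ i, RepP n i ∧ i ≤ n.natAbs + 1 := by
  classical
  set N := n.natAbs with hN
  have hN1 : 1 ≤ N := by omega
  set t : Finset ℤ := if 0 < n then Finset.Ico 0 n else Finset.Ioc n 0 with ht
  have hcard : t.card = N := by
    rcases lt_or_gt_of_ne hn with hneg | hpos
    · simp only [ht, if_neg (by omega : ¬ 0 < n), Int.card_Ioc]
      omega
    · simp only [ht, if_pos hpos, Int.card_Ico]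
      omega
  have hmaps : Set.MapsTo (fun i => pySeq n i) ↑(Finset.Icc 1 (N + 1)) ↑t := by
    intro i hi
    simp only [Finset.coe_Icc, Set.mem_Icc] at hi
    obtain ⟨k, rfl⟩ : ∃ k, i = k + 1 := ⟨i - 1, by omega⟩
    have : pySeq n (k + 1) = PySem.Int.mod (10 * pySeq n k) n := rfl
    rcases lt_or_gt_of_ne hn with hneg | hpos
    · simp only [ht, if_neg (by omega : ¬ 0 < n), Finset.coe_Ioc, Set.mem_Ioc]
      rw [this]
      exact PySem.Int.mod_neg_bounds _ hneg
    · simp only [ht, if_pos hpos, Finset.coe_Ico, Set.mem_Ico]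
      rw [this]
      exact ⟨PySem.Int.mod_nonneg _ hpos, PySem.Int.mod_lt _ hpos⟩
  have hlt : t.card < (Finset.Icc 1 (N + 1)).card := by
    rw [hcard, Nat.card_Icc]
    omega
  obtain ⟨x, hx, y, hy, hxy, hfeq⟩ :=
    Finset.exists_ne_map_eq_of_card_lt_of_maps_to hlt hmaps
  simp only [Finset.mem_Icc] at hx hy
  rcases Nat.lt_or_ge x y with h | h
  · exact ⟨y, ⟨x, h, by omega, hfeq.symm⟩, by omega⟩
  · exact ⟨x, ⟨y, by omega, by omega, hfeq⟩, by omega⟩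

-- periodicity with period I - J from index J on
lemma pySeq_periodic (n : Int) (I J : Nat) (hJI : J < I) (heq : pySeq n I = pySeq n J) :
    ∀ m, J ≤ m → pySeq n (m + (I - J)) = pySeq n m := by
  intro m hm
  obtain ⟨k, rfl⟩ := Nat.exists_eq_add_of_le hm
  rw [show J + k + (I - J) = I + k by omega]
  exact pySeq_shift n I J k heq

-- reduction into the window [J, I)
lemma pySeq_reduce (n : Int) (I J : Nat) (hJI : J < I) (heq : pySeq n I = pySeq n J) :
    ∀ m, J ≤ m → pySeq n m = pySeq n (J + (m - J) % (I - J)) := by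
  intro m
  induction m using Nat.strong_induction_on with
  | _ m ih =>
    intro hm
    by_cases hmi : m < I
    · rw [Nat.mod_eq_of_lt (by omega), Nat.add_sub_cancel' hm]
    · have h1 : J ≤ m - (I - J) := by omega
      have h2 : pySeq n m = pySeq n (m - (I - J)) := by
        have := pySeq_periodic n I J hJI heq (m - (I - J)) h1
        rw [show m - (I - J) + (I - J) = m by omega] at this
        exact this
      rw [h2, ih (m - (I - J)) (by omega) h1]
      congr 2
      have : m - J = (m - (I - J) - J) + (I - J) := by omega
      rw [this, Nat.add_mod_right]

-- no repeat before I means pySeq is injective on [1, I)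
lemma pySeq_inj (n : Int) (I : Nat) (hmin : ∀ b < I, ¬ RepP n b) :
    ∀ a b, 1 ≤ a → a < b → b < I → pySeq n b ≠ pySeq n a := by
  intro a b ha hab hb h
  exact hmin b hb ⟨a, hab, ha, h⟩

-- a repeat gap from any index ≥ J is a multiple of the period I - J
lemma pySeq_iff_dvd (n : Int) (I J : Nat) (hJ1 : 1 ≤ J) (hJI : J < I)
    (heq : pySeq n I = pySeq n J) (hmin : ∀ b < I, ¬ RepP n b) :
    ∀ m k, J ≤ m → 1 ≤ k → (pySeq n (m + k) = pySeq n m ↔ (I - J) ∣ k) := by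
  intro m k hm hk
  have hp : 0 < I - J := by omega
  constructor
  · intro h
    have e1 := pySeq_reduce n I J hJI heq (m + k) (by omega)
    have e2 := pySeq_reduce n I J hJI heq m hm
    rw [e1, e2] at h
    have hr1 : (m + k - J) % (I - J) < I - J := Nat.mod_lt _ hp
    have hr2 : (m - J) % (I - J) < I - J := Nat.mod_lt _ hp
    have hre : (m + k - J) % (I - J) = (m - J) % (I - J) := by
      by_contra hne
      rcases Nat.lt_or_ge (J + (m + k - J) % (I - J)) (J + (m - J) % (I - J)) with hlt | hge
      · exact pySeq_inj n I hmin _ _ (by omega) hlt (by omega) h.symm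
      · have hlt2 : J + (m - J) % (I - J) < J + (m + k - J) % (I - J) := by omega
        exact pySeq_inj n I hmin _ _ (by omega) hlt2 (by omega) h
    have : (m - J + k) % (I - J) = (m - J) % (I - J) := by
      rw [show m - J + k = m + k - J by omega]
      exact hre
    have hmodeq : (m - J + k) ≡ (m - J + 0) [MOD I - J] := by
      simpa [Nat.ModEq] using this
    have := Nat.ModEq.add_left_cancel' (m - J) hmodeq
    exact (Nat.modEq_zero_iff_dvd).mp this
  · rintro ⟨t, rfl⟩
    clear hk
    induction t with
    | zero => simp
    | succ t iht =>
      have hstep := pySeq_periodic n I J hJI heq (m + (I - J) * t)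
        (le_trans hm (Nat.le_add_right m _))
      rw [show m + (I - J) * (t + 1) = (m + (I - J) * t) + (I - J) by rw [Nat.mul_succ, Nat.add_assoc], hstep]
      exact iht

-- cache membership: exactly the values pySeq 1 .. pySeq m
lemma cacheOf_contains (n : Int) (m : Nat) (x : Int) :
    (cacheOf n m).contains x = true ↔ ∃ j, 1 ≤ j ∧ j ≤ m ∧ pySeq n j = x := by
  induction m with
  | zero =>
    simp [cacheOf, PySem.Dict.contains_empty]
  | succ m ih =>
    rw [show cacheOf n (m + 1) = (cacheOf n m).insert (pySeq n (m+1)) ((m+1 : Nat) : Int) from rfl,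
        PySem.Dict.contains_insert]
    constructor
    · intro h
      rcases Bool.or_eq_true_iff.mp h with h | h
      · exact ⟨m + 1, by omega, le_refl _, (eq_of_beq h).symm⟩
      · obtain ⟨j, h1, h2, h3⟩ := ih.mp h
        exact ⟨j, h1, by omega, h3⟩
    · rintro ⟨j, h1, h2, h3⟩
      rcases Nat.lt_or_ge j (m + 1) with hj | hj
      · exact Bool.or_eq_true_iff.mpr (Or.inr (ih.mpr ⟨j, h1, by omega, h3⟩))
      · have : j = m + 1 := by omega
        subst this
        exact Bool.or_eq_true_iff.mpr (Or.inl (by simp [h3]))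

-- cache lookup: first-occurrence index, while all stored keys are distinct
lemma cacheOf_getD (n : Int) (I : Nat) (hmin : ∀ b < I, ¬ RepP n b) :
    ∀ m, m < I → ∀ j, 1 ≤ j → j ≤ m → (cacheOf n m).getD (pySeq n j) 0 = (j : Int) := by
  intro m
  induction m with
  | zero => intro _ j h1 h2; omega
  | succ m ih =>
    intro hmI j h1 h2
    rw [show cacheOf n (m + 1) = (cacheOf n m).insert (pySeq n (m+1)) ((m+1 : Nat) : Int) from rfl,
        PySem.Dict.getD_insert]
    rcases Nat.lt_or_ge j (m + 1) with hj | hj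
    · rw [if_neg (Ne.symm (pySeq_inj n I hmin j (m + 1) h1 hj hmI))]
      exact ih (by omega) j h1 (by omega)
    · have : j = m + 1 := by omega
      subst this
      rw [if_pos rfl]

-- A's loop returns I - J from any consistent intermediate state
lemma A_go_eq (n : Int) (I J : Nat) (hJ1 : 1 ≤ J) (hJI : J < I)
    (heq : pySeq n I = pySeq n J) (hmin : ∀ b < I, ¬ RepP n b) :
    ∀ fuel m, m + 1 ≤ I → I ≤ m + fuel →
      get_period_go n (pySeq n m) ((m : Int) + 1) (cacheOf n m) fuel
        = (I : Int) - (J : Int) := by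
  intro fuel
  induction fuel with
  | zero => intro m h1 h2; omega
  | succ f ih =>
    intro m h1 h2
    have hr : PySem.Int.mod (10 * pySeq n m) n = pySeq n (m + 1) := rfl
    simp only [get_period_go, hr]
    by_cases hI : m + 1 = I
    · have hcon : (cacheOf n m).contains (pySeq n (m + 1)) = true := by
        rw [cacheOf_contains]
        exact ⟨J, hJ1, by omega, by rw [← heq, hI]⟩
      rw [if_pos hcon]
      have hJm : pySeq n (m + 1) = pySeq n J := by rw [hI, heq]
      rw [hJm, cacheOf_getD n I hmin m (by omega) J hJ1 (by omega)]
      omega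
    · have hcon : ¬ ((cacheOf n m).contains (pySeq n (m + 1)) = true) := by
        rw [cacheOf_contains]
        rintro ⟨j, hj1, hjm, hje⟩
        exact hmin (m + 1) (by omega) ⟨j, by omega, hj1, hje.symm⟩
      rw [if_neg hcon]
      have hcache : (cacheOf n m).insert (pySeq n (m + 1)) ((m : Int) + 1)
          = cacheOf n (m + 1) := by
        rw [show cacheOf n (m + 1) = (cacheOf n m).insert (pySeq n (m+1)) ((m+1 : Nat) : Int)
            from rfl]
        congr 1
      rw [hcache]
      have : ((m : Int) + 1) + 1 = ((m + 1 : Nat) : Int) + 1 := by push_cast; ring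
      rw [this]
      exact ih (m + 1) (by omega) (by omega)

-- B's loop returns I - J from any consistent intermediate state
lemma B_go_eq (n : Int) (I J : Nat) (hJ1 : 1 ≤ J) (hJI : J < I)
    (heq : pySeq n I = pySeq n J) (hmin : ∀ b < I, ¬ RepP n b)
    (hIN : I ≤ n.natAbs + 1) :
    ∀ fuel k, 1 ≤ k → k ≤ I - J → I - J ≤ k + fuel →
      get_period_alt_go n (pySeq n (n.natAbs + 1)) (pySeq n (n.natAbs + 1 + k)) (k : Int) fuel
        = (I : Int) - (J : Int) := by
  have hJN : J ≤ n.natAbs + 1 := by omega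
  intro fuel
  induction fuel with
  | zero =>
    intro k h1 h2 h3
    have : k = I - J := by omega
    simp only [get_period_alt_go]
    omega
  | succ f ih =>
    intro k h1 h2 h3
    simp only [get_period_alt_go]
    by_cases hk : k = I - J
    · subst hk
      have hsr : pySeq n (n.natAbs + 1 + (I - J)) = pySeq n (n.natAbs + 1) :=
        pySeq_periodic n I J hJI heq _ hJN
      rw [if_neg (by simp [hsr])]
      omega
    · have hsr : pySeq n (n.natAbs + 1 + k) ≠ pySeq n (n.natAbs + 1) := by
        intro h
        have := (pySeq_iff_dvd n I J hJ1 hJI heq hmin (n.natAbs + 1) k hJN h1).mp h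
        have := Nat.le_of_dvd (by omega) this
        omega
      rw [if_pos hsr]
      have hr : PySem.Int.mod (10 * pySeq n (n.natAbs + 1 + k)) n
          = pySeq n (n.natAbs + 1 + (k + 1)) := by
        rw [show n.natAbs + 1 + (k + 1) = (n.natAbs + 1 + k) + 1 by omega]
        rfl
      rw [hr]
      have : (k : Int) + 1 = ((k + 1 : Nat) : Int) := by push_cast; ring
      rw [this]
      exact ih (k + 1) (by omega) (by omega) (by omega)

-- ===== VERDICT (by name: the statement is the Claim_ definition above) =====
theorem get_period_spec : Claim_equal_get_period := by
  intro n _ hn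
  unfold Spec_get_period Pre_get_period at *
  classical
  obtain ⟨i0, hP, hle⟩ := pySeq_repeat n hn
  haveI : DecidablePred (RepP n) := by
    intro i
    unfold RepP
    infer_instance
  have hex : ∃ i, RepP n i := ⟨i0, hP⟩
  set I := Nat.find hex with hI
  have hspec : RepP n I := Nat.find_spec hex
  have hmin : ∀ b < I, ¬ RepP n b := fun b hb => Nat.find_min hex hb
  obtain ⟨J, hJI, hJ1, heq⟩ := hspec
  have hIle : I ≤ n.natAbs + 1 := le_trans (Nat.find_min' hex hP) hle
  -- A's side
  have hA : get_period n = (I : Int) - (J : Int) := by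
    have := A_go_eq n I J hJ1 hJI heq hmin (n.natAbs + 2) 0 (by omega) (by omega)
    simpa [get_period, pySeq, cacheOf] using this
  -- B's side
  have hB : get_period_alt n = (I : Int) - (J : Int) := by
    have hpow : PySem.Int.powMod 10 (n.natAbs + 1) n = pySeq n (n.natAbs + 1) := by
      rw [PySem.Int.powMod_eq, ← pySeq_eq_powMod n hn (n.natAbs + 1) (by omega)]
    have hs : PySem.Int.mod (10 * pySeq n (n.natAbs + 1)) n
        = pySeq n (n.natAbs + 1 + 1) := rfl
    have := B_go_eq n I J hJ1 hJI heq hmin hIle (n.natAbs + 2) 1 (by omega) (by omega)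
      (by omega)
    simp only [get_period_alt, hpow, hs]
    simpa using this
  rw [hA, hB]
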